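-- pv_equiv track=rewrite | github.com/loadingsjy/my-algorithm | sliding_window/longestSemiRepetitiveSubstring.py | longestSemiRepetitiveSubstring2
-- ===== SOURCE A (Python) =====
-- def longestSemiRepetitiveSubstring2(s: str) -> int:
--     """灵神写法"""
--     ans, left, same = 1, 0, 0
--     for right in range(1, len(s)):
--         same += s[right] == s[right - 1]
--         if same > 1:
--             left += 1
--             while s[left] != s[left - 1]:
--                 left += 1
--             same = 1
--         ans = max(ans, right - left + 1)
--     return ans
-- ===== SOURCE B (Python) =====
-- def longestSemiRepetitiveSubstring2(s: str) -> int: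
--     n = len(s)
--     bad = [i for i in range(1, n) if s[i] == s[i - 1]]
--     if len(bad) <= 1:
--         return max(1, n)
--     best = 0
--     for k in range(len(bad)):
--         lo = bad[k - 1] if k > 0 else 0
--         hi = bad[k + 1] if k + 1 < len(bad) else n
--         best = max(best, hi - lo)
--     return best
-- ===== Notes on version B (the rewrite author's own statement) =====
-- stated objective: alternative
-- what changed: Replaces A's sliding window (left pointer with an inner while-scan and a per-step duplicate counter) by a two-phase computation: one pass collects the list of adjacent-duplicate positions, then the answer is the maximum gap bad[k+1]-bad[k-1] over that (usually much shorter) list with sentinels 0 and n.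
import Mathlib
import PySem

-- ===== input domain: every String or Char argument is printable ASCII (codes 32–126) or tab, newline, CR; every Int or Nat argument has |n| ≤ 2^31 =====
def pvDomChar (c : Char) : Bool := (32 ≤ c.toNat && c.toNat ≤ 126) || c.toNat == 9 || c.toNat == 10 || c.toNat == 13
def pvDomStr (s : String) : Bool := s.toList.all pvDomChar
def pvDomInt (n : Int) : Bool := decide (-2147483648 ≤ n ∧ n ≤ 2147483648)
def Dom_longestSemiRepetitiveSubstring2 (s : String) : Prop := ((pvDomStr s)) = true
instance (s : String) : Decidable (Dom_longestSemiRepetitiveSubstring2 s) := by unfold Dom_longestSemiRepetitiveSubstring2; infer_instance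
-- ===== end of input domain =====

-- B replaces A's sliding window by a bad-position list plus a max-gap scan: an alternative
-- two-phase algorithm of the same O(n) cost.

-- ===== PORT A =====
-- A's indices are always nonnegative and in range while its loop runs, so Nat indexing with
-- `getD _ 'a'` is exact there; the inner `while` is totalised with fuel = len(s), which is
-- never exhausted when the Python loop terminates (it always does, before raising).
def pvAdvA (l : List Char) : Nat → Nat → Nat
  | left, 0 => left
  | left, fuel+1 =>
    if l.getD left 'a' ≠ l.getD (left-1) 'a' then pvAdvA l (left+1) fuel else left

def pvStepA (l : List Char) (st : Int × Nat × Nat) (right : Nat) : Int × Nat × Nat :=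
  let same := st.2.2 + (if l.getD right 'a' = l.getD (right-1) 'a' then 1 else 0)
  let ls := if 1 < same then (pvAdvA l (st.2.1 + 1) l.length, 1) else (st.2.1, same)
  (max st.1 ((right : Int) - (ls.1 : Int) + 1), ls.1, ls.2)

def longestSemiRepetitiveSubstring2 (s : String) : Int :=
  let l := s.toList
  ((List.range' 1 (l.length - 1)).foldl (pvStepA l) (1, 0, 0)).1

-- ===== PORT B =====
-- `bad = [i for i in range(1, n) if s[i] == s[i-1]]` (indices kept as Nat; all are ≥ 1)
def pvBadList (l : List Char) : List Nat :=
  (List.range' 1 (l.length - 1)).filter (fun i => l.getD i 'a' = l.getD (i-1) 'a')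

-- the `for k in range(len(bad))` max-gap loop of Source B, with `n` passed as the end sentinel
def pvGapMax (bad : List Nat) (n : Nat) : Int :=
  (List.range bad.length).foldl (fun best k =>
    let lo : Nat := if 0 < k then bad.getD (k-1) 0 else 0
    let hi : Nat := if k + 1 < bad.length then bad.getD (k+1) 0 else n
    max best ((hi : Int) - (lo : Int))) 0

def longestSemiRepetitiveSubstring2_alt (s : String) : Int :=
  let l := s.toList
  let bad := pvBadList l
  if bad.length ≤ 1 then max 1 (l.length : Int)
  else pvGapMax bad l.length

-- ===== PRECONDITION & SPEC =====
def Spec_longestSemiRepetitiveSubstring2 (s : String) (out : Int) : Prop := out = longestSemiRepetitiveSubstring2_alt s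
instance (s : String) (out : Int) : Decidable (Spec_longestSemiRepetitiveSubstring2 s out) := by unfold Spec_longestSemiRepetitiveSubstring2; infer_instance

-- ===== CLAIM (what is proved, stated in full; the proofs are below) =====
def Claim_equal_longestSemiRepetitiveSubstring2 : Prop := ∀ (s : String), Dom_longestSemiRepetitiveSubstring2 s → Spec_longestSemiRepetitiveSubstring2 s (longestSemiRepetitiveSubstring2 s)

-- ===== LEMMAS AND PROOFS =====

-- bad positions among 1..r
def pvBads (l : List Char) (r : Nat) : List Nat :=
  (List.range' 1 r).filter (fun i => l.getD i 'a' = l.getD (i-1) 'a')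

-- second-to-last bad position (0 if fewer than two)
def pvPen (bs : List Nat) : Nat := if bs.length ≤ 1 then 0 else bs.getD (bs.length - 2) 0

-- A's `ans` after processing right = 1..r, expressed via B's pieces
def pvAval (l : List Char) (r : Nat) : Int :=
  if (pvBads l r).length ≤ 1 then max 1 ((r : Int) + 1) else pvGapMax (pvBads l r) (r + 1)

-- the part of the gap fold not depending on the end sentinel
def pvGapCore (bad : List Nat) : Int :=
  (List.range (bad.length - 1)).foldl (fun best k =>
    max best ((bad.getD (k+1) 0 : Int) - ((if 0 < k then bad.getD (k-1) 0 else 0 : Nat) : Int))) 0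

theorem pvMem_bads {l : List Char} {r j : Nat} :
    j ∈ pvBads l r ↔ (1 ≤ j ∧ j < 1 + r ∧ l.getD j 'a' = l.getD (j-1) 'a') := by
  simp only [pvBads, List.mem_filter, List.mem_range', decide_eq_true_eq]
  constructor
  · rintro ⟨⟨i, hi, rfl⟩, h3⟩
    exact ⟨by omega, by omega, h3⟩
  · rintro ⟨h1, h2, h3⟩
    exact ⟨⟨j-1, by omega, by omega⟩, h3⟩

theorem pvBads_pairwise (l : List Char) (r : Nat) : (pvBads l r).Pairwise (· < ·) :=
  (List.pairwise_lt_range' ..).sublist List.filter_sublist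

theorem pvBads_succ (l : List Char) (r : Nat) :
    pvBads l (r+1) = if l.getD (r+1) 'a' = l.getD r 'a' then pvBads l r ++ [r+1] else pvBads l r := by
  unfold pvBads
  rw [List.range'_1_concat, List.filter_append, Nat.add_comm 1 r]
  by_cases hb : l.getD (r+1) 'a' = l.getD r 'a'
  · rw [if_pos hb]
    congr 1
    rw [List.filter_cons, if_pos (by simp only [decide_eq_true_eq]; simpa using hb), List.filter_nil]
  · rw [if_neg hb]
    rw [List.filter_cons, if_neg (by simp only [decide_eq_true_eq]; simpa using hb), List.filter_nil,
        List.append_nil]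

theorem pvGetElem_congr {bs : List Nat} {i j : Nat} (hi : i < bs.length) (hj : j < bs.length)
    (h : i = j) : bs[i]'hi = bs[j]'hj := by subst h; rfl

theorem pvNoBetween {bs : List Nat} (hp : bs.Pairwise (· < ·)) (h1 : 1 ≤ bs.length)
    {j : Nat} (hlo : pvPen bs < j) (hhi : j < bs.getD (bs.length - 1) 0) : j ∉ bs := by
  intro hmem
  obtain ⟨t, ht, rfl⟩ := List.getElem_of_mem hmem
  rw [List.getD_eq_getElem bs 0 (by omega)] at hhi
  rw [List.pairwise_iff_getElem] at hp
  unfold pvPen at hlo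
  by_cases h2 : bs.length ≤ 1
  · rw [if_pos h2] at hlo
    have heq : bs[t] = bs[bs.length - 1]'(by omega) := pvGetElem_congr ht (by omega) (by omega)
    omega
  · rw [if_neg h2, List.getD_eq_getElem bs 0 (by omega)] at hlo
    rcases Nat.lt_trichotomy t (bs.length - 2) with h | h | h
    · have := hp t (bs.length - 2) (by omega) (by omega) h
      omega
    · have heq : bs[t] = bs[bs.length - 2]'(by omega) := pvGetElem_congr ht (by omega) h
      omega
    · have heq : bs[t] = bs[bs.length - 1]'(by omega) := pvGetElem_congr ht (by omega) (by omega)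
      omega

-- the while loop reaches the first bad position ≥ start
theorem pvAdvA_eq {l : List Char} {target : Nat} :
    ∀ fuel start, start ≤ target → target - start ≤ fuel →
    l.getD target 'a' = l.getD (target - 1) 'a' →
    (∀ j, start ≤ j → j < target → ¬ (l.getD j 'a' = l.getD (j-1) 'a')) →
    pvAdvA l start fuel = target := by
  intro fuel
  induction fuel with
  | zero =>
    intro start h1 h2 _ _
    have : start = target := by omega
    simp [pvAdvA, this]
  | succ n ih =>
    intro start h1 h2 hbad hno
    rcases Nat.eq_or_lt_of_le h1 with rfl | hlt
    · rw [pvAdvA, if_neg (not_not_intro hbad)]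
    · have hne : ¬ (l.getD start 'a' = l.getD (start-1) 'a') := hno start le_rfl hlt
      rw [pvAdvA, if_pos hne]
      exact ih (start+1) (by omega) (by omega) hbad (fun j hj hj' => hno j (by omega) hj')

theorem pvFoldMax_succ (g : Nat → Int) (m : Nat) :
    (List.range (m+1)).foldl (fun b k => max b (g k)) 0
      = max ((List.range m).foldl (fun b k => max b (g k)) 0) (g m) := by
  rw [List.range_succ, List.foldl_append]
  rfl

theorem pvFoldMax_congr (g g' : Nat → Int) (m : Nat) (h : ∀ k, k < m → g k = g' k) :
    (List.range m).foldl (fun b k => max b (g k)) 0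
      = (List.range m).foldl (fun b k => max b (g' k)) 0 :=
  by
  apply List.foldl_ext
  intro a k hk
  rw [h k (List.mem_range.mp hk)]

theorem pvGapMax_split {bs : List Nat} (h : 2 ≤ bs.length) (e : Nat) :
    pvGapMax bs e = max (pvGapCore bs) ((e : Int) - (pvPen bs : Int)) := by
  simp only [pvGapMax, pvGapCore]
  rw [show List.range bs.length = List.range ((bs.length - 1) + 1) by rw [Nat.sub_add_cancel (by omega)]]
  rw [pvFoldMax_succ]
  rw [pvFoldMax_congr _
    (fun k => ((bs.getD (k+1) 0 : Int) - ((if 0 < k then bs.getD (k-1) 0 else 0 : Nat) : Int)))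
    (bs.length - 1)
    (by
      intro k hk
      rw [if_pos (show k + 1 < bs.length by omega)])]
  rw [if_neg (show ¬ (bs.length - 1 + 1 < bs.length) by omega),
      if_pos (show 0 < bs.length - 1 by omega)]
  unfold pvPen
  rw [if_neg (by omega), show bs.length - 1 - 1 = bs.length - 2 by omega]

theorem pvGapCore_append {bs : List Nat} (h : 2 ≤ bs.length) (x : Nat) :
    pvGapCore (bs ++ [x]) = max (pvGapCore bs) ((x : Int) - (pvPen bs : Int)) := by
  simp only [pvGapCore]
  rw [show (bs ++ [x]).length - 1 = (bs.length - 1) + 1 by simp; omega]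
  rw [pvFoldMax_succ]
  rw [pvFoldMax_congr _
    (fun k => ((bs.getD (k+1) 0 : Int) - ((if 0 < k then bs.getD (k-1) 0 else 0 : Nat) : Int)))
    (bs.length - 1)
    (by
      intro k hk
      rw [List.getD_append _ _ _ _ (by omega)]
      congr 2
      by_cases h0 : 0 < k
      · rw [if_pos h0, if_pos h0, List.getD_append _ _ _ _ (by omega)]
      · rw [if_neg h0, if_neg h0])]
  have e1 : (bs ++ [x]).getD (bs.length - 1 + 1) 0 = x := by
    rw [List.getD_eq_getElem _ 0 (by simp; omega)]
    rw [List.getElem_append_right (by omega)]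
    simp
  have e2 : (bs ++ [x]).getD (bs.length - 1 - 1) 0 = bs.getD (bs.length - 2) 0 := by
    rw [show bs.length - 1 - 1 = bs.length - 2 by omega]
    exact List.getD_append _ _ _ _ (by omega)
  rw [e1, if_pos (show 0 < bs.length - 1 by omega), e2]
  unfold pvPen
  rw [if_neg (by omega)]

-- pvAval satisfies A's `ans` recurrence
theorem pvAval_rec (l : List Char) (r : Nat) :
    pvAval l (r+1) = max (pvAval l r) (((r:Int)+1) - (pvPen (pvBads l (r+1)) : Int) + 1) := by
  unfold pvAval
  rw [pvBads_succ]
  by_cases hb : l.getD (r+1) 'a' = l.getD r 'a'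
  · rw [if_pos hb]
    generalize pvBads l r = M
    match M with
    | [] =>
      simp only [List.nil_append, List.length_cons, List.length_nil]
      rw [if_pos (by omega), if_pos (by omega)]
      unfold pvPen
      rw [if_pos (by simp)]
      push_cast
      omega
    | [b] =>
      simp only [List.cons_append, List.nil_append, List.length_cons, List.length_nil]
      rw [if_neg (by omega), if_pos (by omega)]
      simp [pvGapMax, pvPen, List.range_succ]
      omega
    | b1 :: b2 :: tl =>
      have h2 : 2 ≤ (b1 :: b2 :: tl).length := by simp
      have h2' : 2 ≤ ((b1 :: b2 :: tl) ++ [r+1]).length := by simp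
      rw [if_neg (by simp), if_neg (by simp)]
      rw [pvGapMax_split h2' (r+1+1), pvGapMax_split h2 (r+1), pvGapCore_append h2]
      have hpen : pvPen ((b1 :: b2 :: tl) ++ [r+1])
          = (b1 :: b2 :: tl).getD ((b1 :: b2 :: tl).length - 1) 0 := by
        unfold pvPen
        rw [if_neg (by simp), show ((b1 :: b2 :: tl) ++ [r+1]).length - 2 = (b1 :: b2 :: tl).length - 1 by simp]
        exact List.getD_append _ _ _ _ (by simp)
      have hpen2 : pvPen (b1 :: b2 :: tl) = (b1 :: b2 :: tl).getD ((b1 :: b2 :: tl).length - 2) 0 := by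
        unfold pvPen
        rw [if_neg (by simp)]
      rw [hpen]
      push_cast
      omega
  · rw [if_neg hb]
    generalize pvBads l r = M
    by_cases h1 : M.length ≤ 1
    · rw [if_pos h1, if_pos h1]
      unfold pvPen
      rw [if_pos h1]
      push_cast
      omega
    · rw [if_neg h1, if_neg h1]
      rw [pvGapMax_split (by omega) (r+1+1), pvGapMax_split (by omega) (r+1)]
      unfold pvPen
      rw [if_neg h1]
      push_cast
      omega

-- the main loop invariant: A's state after processing rights 1..r
theorem pvMain (l : List Char) :
    ∀ r, r ≤ l.length - 1 →
    (List.range' 1 r).foldl (pvStepA l) (1, 0, 0)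
      = (pvAval l r, pvPen (pvBads l r), min (pvBads l r).length 1) := by
  intro r
  induction r with
  | zero => intro _; simp [pvBads, pvAval, pvPen]
  | succ r ih =>
    intro hr
    rw [List.range'_1_concat, List.foldl_append, ih (by omega)]
    simp only [List.foldl_cons, List.foldl_nil]
    rw [Nat.add_comm 1 r]
    unfold pvStepA
    dsimp only
    have hav := pvAval_rec l r
    by_cases hb : l.getD (r+1) 'a' = l.getD (r+1-1) 'a'
    · -- bad step
      have hb' : l.getD (r+1) 'a' = l.getD r 'a' := by simpa using hb
      have hbnew : pvBads l (r+1) = pvBads l r ++ [r+1] := by rw [pvBads_succ, if_pos hb']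
      rw [if_pos hb]
      by_cases h0 : (pvBads l r).length = 0
      · -- no previous bad: same becomes 1, left stays
        rw [if_neg (show ¬ (1 < min (pvBads l r).length 1 + 1) by omega)]
        dsimp only
        have hbsnil : pvBads l r = [] := List.length_eq_zero_iff.mp h0
        have hpen0 : pvPen (pvBads l r) = 0 := by unfold pvPen; rw [if_pos (by omega)]
        have hpen1 : pvPen (pvBads l (r+1)) = 0 := by
          rw [hbnew, hbsnil]
          unfold pvPen
          simp
        rw [hpen1] at hav
        simp only [Prod.mk.injEq]
        refine ⟨?_, ?_, ?_⟩
        · rw [hav, hpen0]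
          push_cast
          omega
        · rw [hpen0, hpen1]
        · rw [hbnew]
          simp only [List.length_append, List.length_cons, List.length_nil]
          omega
      · -- a previous bad exists: same becomes 2, the while loop advances left
        have h1 : 1 ≤ (pvBads l r).length := by omega
        rw [if_pos (show 1 < min (pvBads l r).length 1 + 1 by omega)]
        dsimp only
        have hpair := pvBads_pairwise l r
        have hlast_mem : (pvBads l r).getD ((pvBads l r).length - 1) 0 ∈ pvBads l r := by
          rw [List.getD_eq_getElem _ 0 (by omega)]
          exact List.getElem_mem _
        have hlast := pvMem_bads.mp hlast_mem
        have hpenlt : pvPen (pvBads l r) < (pvBads l r).getD ((pvBads l r).length - 1) 0 := by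
          unfold pvPen
          by_cases h2 : (pvBads l r).length ≤ 1
          · rw [if_pos h2]
            omega
          · rw [if_neg h2, List.getD_eq_getElem _ 0 (by omega), List.getD_eq_getElem _ 0 (by omega)]
            exact (List.pairwise_iff_getElem.mp hpair) _ _ (by omega) (by omega) (by omega)
        have hadv : pvAdvA l (pvPen (pvBads l r) + 1) l.length
            = (pvBads l r).getD ((pvBads l r).length - 1) 0 := by
          apply pvAdvA_eq l.length _ (by omega) (by omega) hlast.2.2
          intro j hj hj' hbadj
          exact absurd (pvMem_bads.mpr ⟨by omega, by omega, hbadj⟩)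
            (pvNoBetween hpair h1 (by omega) hj')
        have hpennew : pvPen (pvBads l (r+1)) = (pvBads l r).getD ((pvBads l r).length - 1) 0 := by
          rw [hbnew]
          unfold pvPen
          rw [if_neg (by simp only [List.length_append, List.length_cons, List.length_nil]; omega),
              show (pvBads l r ++ [r+1]).length - 2 = (pvBads l r).length - 1 by
                simp only [List.length_append, List.length_cons, List.length_nil]; omega]
          exact List.getD_append _ _ _ _ (by omega)
        rw [hpennew] at hav
        simp only [Prod.mk.injEq]
        refine ⟨?_, ?_, ?_⟩
        · rw [hav, hadv]
          push_cast
          omega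
        · rw [hadv, hpennew]
        · rw [hbnew]
          simp only [List.length_append, List.length_cons, List.length_nil]
          omega
    · -- not a bad step
      have hb2 : ¬ l.getD (r+1) 'a' = l.getD r 'a' := by simpa using hb
      have hbnew : pvBads l (r+1) = pvBads l r := by rw [pvBads_succ, if_neg hb2]
      rw [if_neg hb, if_neg (show ¬ (1 < min (pvBads l r).length 1 + 0) by omega)]
      dsimp only
      rw [hbnew] at hav
      simp only [Prod.mk.injEq]
      refine ⟨?_, ?_, ?_⟩
      · rw [hav]
        omega
      · rw [hbnew]
      · rw [hbnew]
        omega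

theorem pvFinal (s : String) :
    longestSemiRepetitiveSubstring2 s = longestSemiRepetitiveSubstring2_alt s := by
  simp only [longestSemiRepetitiveSubstring2, longestSemiRepetitiveSubstring2_alt]
  have hbl : pvBadList s.toList = pvBads s.toList (s.toList.length - 1) := rfl
  rw [pvMain s.toList (s.toList.length - 1) le_rfl, hbl]
  rcases Nat.eq_zero_or_pos s.toList.length with h0 | hpos
  · rw [h0]
    simp [pvAval, pvBads]
  · unfold pvAval
    rw [show s.toList.length - 1 + 1 = s.toList.length by omega]
    split
    · push_cast
      omega
    · rfl

-- ===== VERDICT (by name: the statement is the Claim_ definition above) =====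
theorem longestSemiRepetitiveSubstring2_spec : Claim_equal_longestSemiRepetitiveSubstring2 := by
  intro s _
  unfold Spec_longestSemiRepetitiveSubstring2
  exact pvFinal s
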